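-- pv_equiv track=rewrite | github.com/Ssunbell/Algorithm_Study | 12주차/PRO_신고결과받기/PRT_신고결과받기_신지우.py | solution
-- ===== SOURCE A (Python) =====
-- from collections import defaultdict
--
-- def solution(id_list, report, k):
--     answer = []
--
--     # 중복 신고 제거
--     report = list(set(report))
--
--     # user별 신고한 id
--     user = defaultdict(set)
--
--     # user별 신고 당한 횟수 저장
--     count = defaultdict(int)
--
--     for i in report:
--         # report의 첫번째 값은 신고자 id, 두번째 값은 신고당한 id
--         reporter, reported = i.split()
--
--         # 신고자가 신고한 id 추가
--         user[reporter].add(reported)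
--
--         # 신고당한 id의 신고 횟수 추가
--         # 이렇게 하는 이유: 같은 사람이 같은 사람 신고하면 어차피 횟수는 1번만 증가해야하기 때문데
--         count[reported] += 1
--
--     # k번 이상 신고 당했으면, 받을 메일 추가
--     for j in id_list:
--         result = 0
--         for z in user[j]:
--             if count[z] >= k:
--                 result += 1
--         answer.append(result)
--     return answer
-- ===== SOURCE B (Python) =====
-- def solution(id_list, report, k):
--     # one pass over the deduped report strings: collect the distinct
--     # (reporter, reported) pairs and the per-reportee report count
--     pairs = set()
--     count = {}
--     for r in set(report):
--         reporter, reported = r.split()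
--         pairs.add((reporter, reported))
--         count[reported] = count.get(reported, 0) + 1
--
--     # who gets banned
--     banned = {who for who, c in count.items() if c >= k}
--
--     # one linear pass over the pairs: mails received per reporter
--     res = {}
--     for reporter, reported in pairs:
--         if reported in banned:
--             res[reporter] = res.get(reporter, 0) + 1
--
--     return [res.get(u, 0) for u in id_list]
-- ===== Notes on version B (the rewrite author's own statement) =====
-- stated objective: simpler
-- what changed: Replaces A's per-user dict of reported-sets and the nested loop over id_list x user[j] with a banned set and one linear pass over the deduped (reporter,reported) pairs that accumulates a per-reporter result dict, finished by a res.get(u,0) lookup per id; Pre_ excludes report entries that do not split into exactly two whitespace-separated tokens, on which A's tuple unpacking raises ValueError.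
import Mathlib
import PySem

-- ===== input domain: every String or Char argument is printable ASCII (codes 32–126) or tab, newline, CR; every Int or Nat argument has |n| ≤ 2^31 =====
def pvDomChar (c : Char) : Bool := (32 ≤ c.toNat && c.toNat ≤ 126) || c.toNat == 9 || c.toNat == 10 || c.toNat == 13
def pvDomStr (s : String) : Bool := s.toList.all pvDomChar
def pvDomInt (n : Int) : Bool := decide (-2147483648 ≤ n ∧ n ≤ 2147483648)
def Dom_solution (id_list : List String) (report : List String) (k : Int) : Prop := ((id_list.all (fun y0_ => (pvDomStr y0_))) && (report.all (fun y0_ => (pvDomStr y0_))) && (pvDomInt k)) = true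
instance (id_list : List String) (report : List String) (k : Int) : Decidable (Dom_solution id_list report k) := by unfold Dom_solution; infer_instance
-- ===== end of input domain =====

-- B replaces A's per-user dict of reported-sets and nested loop with a banned set and one
-- linear pass over the deduped (reporter, reported) pairs accumulating a per-reporter dict (objective: simpler).

-- ===== PORT A =====
-- loop body of A's first 'for i in report:' (state = (user, count)); a report entry that does
-- not split into exactly two tokens makes Python's unpacking raise ValueError (excluded by Pre_);
-- there the port leaves the state unchanged.
def stepA (st : PySem.Dict String (PySem.Set String) × PySem.Dict String Int) (i : String) :
    PySem.Dict String (PySem.Set String) × PySem.Dict String Int :=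
  match PySem.Str.split₀ i with
  | [reporter, reported] =>
      (st.1.insert reporter (PySem.Set.add (st.1.getD reporter PySem.Set.empty) reported),
       st.2.insert reported (st.2.getD reported 0 + 1))
  | _ => st

def solution (id_list : List String) (report : List String) (k : Int) : List Int :=
  -- report = list(set(report)); the final answer does not depend on the set's iteration order
  let report' : PySem.Set String := PySem.Set.ofList report
  let uc := report'.foldl stepA (PySem.Dict.empty, PySem.Dict.empty)
  -- second loop: for j in id_list, count z in user[j] with count[z] >= k
  -- (Python's defaultdict read user[j] inserts an empty set for a missing j; that never
  --  changes any later lookup, so the port reads with getD)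
  id_list.foldl (fun answer j =>
    answer ++ [(uc.1.getD j PySem.Set.empty).foldl
      (fun result z => if uc.2.getD z 0 ≥ k then result + 1 else result) 0]) []

-- ===== PORT B =====
-- loop body of B's 'for r in set(report):' (state = (pairs, count)); same ValueError corner as A.
def stepB (st : PySem.Set (String × String) × PySem.Dict String Int) (r : String) :
    PySem.Set (String × String) × PySem.Dict String Int :=
  match PySem.Str.split₀ r with
  | [reporter, reported] =>
      (PySem.Set.add st.1 (reporter, reported),
       st.2.insert reported (st.2.getD reported 0 + 1))
  | _ => st

def solution_alt (id_list : List String) (report : List String) (k : Int) : List Int :=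
  let pc := (PySem.Set.ofList report).foldl stepB (PySem.Set.empty, PySem.Dict.empty)
  let banned : PySem.Set String :=
    PySem.Set.ofList ((pc.2.items.filter (fun p => p.2 ≥ k)).map (·.1))
  let res := pc.1.foldl
    (fun (d : PySem.Dict String Int) p =>
      if PySem.Set.contains banned p.2 then d.insert p.1 (d.getD p.1 0 + 1) else d)
    PySem.Dict.empty
  id_list.map (fun u => res.getD u 0)

-- ===== PRECONDITION & SPEC =====
-- Pre_ excludes exactly the inputs where a report entry does not split into two
-- whitespace-separated tokens: there Python A's tuple unpacking raises ValueError.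
def Pre_solution (id_list : List String) (report : List String) (k : Int) : Prop :=
  ∀ s ∈ report, (PySem.Str.split₀ s).length = 2
instance (id_list : List String) (report : List String) (k : Int) : Decidable (Pre_solution id_list report k) := by unfold Pre_solution; infer_instance

def pvWitness_solution : List String × List String × Int := (["muzi", "frodo"], ["muzi frodo", "frodo muzi", "muzi frodo"], 1)

def Spec_solution (id_list : List String) (report : List String) (k : Int) (out : List Int) : Prop := out = solution_alt id_list report k
instance (id_list : List String) (report : List String) (k : Int) (out : List Int) : Decidable (Spec_solution id_list report k out) := by unfold Spec_solution; infer_instance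

-- ===== CLAIM (what is proved, stated in full; the proofs are below) =====
def Claim_equal_solution : Prop := ∀ (id_list : List String) (report : List String) (k : Int), Dom_solution id_list report k → Pre_solution id_list report k → Spec_solution id_list report k (solution id_list report k)

-- ===== LEMMAS AND PROOFS =====

-- Joint invariant of the two folds: the per-user sets of A describe exactly the pair set of B,
-- everything built stays duplicate-free, every reported id in a pair is a key of count.
def InvAB (u : PySem.Dict String (PySem.Set String)) (p : PySem.Set (String × String))
    (c : PySem.Dict String Int) : Prop :=
  (∀ j b, b ∈ u.getD j PySem.Set.empty ↔ (j, b) ∈ p) ∧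
  (∀ j, (u.getD j PySem.Set.empty).Nodup) ∧
  p.Nodup ∧ c.keys.Nodup ∧
  (∀ j b, (j, b) ∈ p → c.contains b = true)

theorem fold_inv (L : List String) (u : PySem.Dict String (PySem.Set String))
    (p : PySem.Set (String × String)) (c : PySem.Dict String Int) (h : InvAB u p c) :
    InvAB (L.foldl stepA (u, c)).1 (L.foldl stepB (p, c)).1 (L.foldl stepA (u, c)).2 ∧
      (L.foldl stepA (u, c)).2 = (L.foldl stepB (p, c)).2 := by
  induction L generalizing u p c with
  | nil => exact ⟨h, rfl⟩
  | cons i L ih =>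
    simp only [List.foldl_cons]
    match hs : PySem.Str.split₀ i with
    | [a, b] =>
      simp only [stepA, stepB, hs]
      apply ih
      obtain ⟨hmem, hnd, hpnd, hknd, hcont⟩ := h
      refine ⟨?_, ?_, PySem.Set.nodup_add p (a, b) hpnd, PySem.Dict.nodup_keys_insert _ _ _ hknd, ?_⟩
      · intro j b'
        by_cases hja : j = a
        · subst hja
          rw [PySem.Dict.getD_insert_self, PySem.Set.mem_add _ _ _, hmem,
              PySem.Set.mem_add p (j, b) (j, b')]
          simp [Prod.ext_iff]
        · rw [PySem.Dict.getD_insert_of_ne u _ PySem.Set.empty hja, hmem,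
              PySem.Set.mem_add p (a, b) (j, b')]
          constructor
          · exact Or.inl
          · rintro (hb | he)
            · exact hb
            · exact absurd (congrArg Prod.fst he) hja
      · intro j
        by_cases hja : j = a
        · subst hja; rw [PySem.Dict.getD_insert_self]; exact PySem.Set.nodup_add _ _ (hnd j)
        · rw [PySem.Dict.getD_insert_of_ne u _ PySem.Set.empty hja]; exact hnd j
      · intro j b' hb'
        rcases (PySem.Set.mem_add p (a, b) (j, b')).mp hb' with hb' | he
        · rw [PySem.Dict.contains_insert]
          simp [hcont j b' hb']
        · have hb'' : b' = b := congrArg Prod.snd he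
          subst hb''
          exact PySem.Dict.contains_insert_self _ _ _
    | [] => simp only [stepA, stepB, hs]; exact ih u p c h
    | [x] => simp only [stepA, stepB, hs]; exact ih u p c h
    | x :: y :: z :: t => simp only [stepA, stepB, hs]; exact ih u p c h

theorem inv_init : InvAB PySem.Dict.empty PySem.Set.empty PySem.Dict.empty := by
  refine ⟨?_, ?_, ?_, ?_, ?_⟩
  · intro j b; rw [PySem.Dict.getD_empty]; simp [PySem.Set.empty]
  · intro j; rw [PySem.Dict.getD_empty]; simp [PySem.Set.empty]
  · simp [PySem.Set.empty]
  · simp [PySem.Dict.empty, PySem.Dict.keys]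
  · intro j b h; simp [PySem.Set.empty] at h

-- B's result-dict pass counts, per reporter j, the pairs whose reportee passes q
theorem res_getD (q : String → Bool) (l : List (String × String)) (d : PySem.Dict String Int)
    (j : String) :
    (l.foldl (fun (d : PySem.Dict String Int) p =>
        if q p.2 then d.insert p.1 (d.getD p.1 0 + 1) else d) d).getD j 0 =
      d.getD j 0 + ((l.filter (fun p => q p.2 && p.1 == j)).length : Int) := by
  induction l generalizing d with
  | nil => simp
  | cons p l ih =>
    simp only [List.foldl_cons, List.filter_cons]
    by_cases hq : q p.2
    · rw [if_pos hq]
      by_cases hj : p.1 = j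
      · subst hj
        rw [ih, if_pos (by simp [hq]), PySem.Dict.getD_insert_self]
        simp only [List.length_cons, Nat.cast_add, Nat.cast_one]; ring
      · rw [ih, if_neg (by simp [hq, hj]),
            PySem.Dict.getD_insert_of_ne d _ 0 (Ne.symm hj)]
    · rw [if_neg hq, ih, if_neg (by simp [hq])]

-- membership in B's banned set, given nodup count keys
theorem mem_banned (c : PySem.Dict String Int) (k : Int) (hknd : c.keys.Nodup) (z : String) :
    (PySem.Set.contains
        (PySem.Set.ofList ((c.items.filter (fun p => p.2 ≥ k)).map (·.1))) z = true) ↔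
      (c.contains z = true ∧ c.getD z 0 ≥ k) := by
  rw [PySem.Set.contains_iff, PySem.Set.mem_ofList]
  simp only [List.mem_map, List.mem_filter]
  constructor
  · rintro ⟨⟨z', v⟩, ⟨hmem, hv⟩, rfl⟩
    have hget := PySem.Dict.get?_of_mem_items _ hmem hknd
    refine ⟨?_, ?_⟩
    · rw [PySem.Dict.contains_eq_isSome_get? c z', hget]; rfl
    · rw [PySem.Dict.getD_of_get?_eq_some _ 0 hget]; exact of_decide_eq_true hv
  · rintro ⟨hc, hv⟩
    have hsome : (c.get? z).isSome := by
      rw [← PySem.Dict.contains_eq_isSome_get? c z]; exact hc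
    rcases Option.isSome_iff_exists.mp hsome with ⟨v, hget⟩
    refine ⟨(z, v), ⟨PySem.Dict.mem_items_of_get?_eq_some c hget, ?_⟩, rfl⟩
    have : c.getD z 0 = v := PySem.Dict.getD_of_get?_eq_some c 0 hget
    simpa [this] using hv

-- A's inner loop over user[j] equals B's res lookup at j
theorem per_user (u : PySem.Dict String (PySem.Set String)) (p : PySem.Set (String × String))
    (c : PySem.Dict String Int) (k : Int) (h : InvAB u p c) (j : String) :
    (u.getD j PySem.Set.empty).foldl
        (fun result z => if c.getD z 0 ≥ k then result + 1 else result) 0 =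
      (p.foldl (fun (d : PySem.Dict String Int) q =>
          if PySem.Set.contains
              (PySem.Set.ofList ((c.items.filter (fun r => r.2 ≥ k)).map (·.1))) q.2
          then d.insert q.1 (d.getD q.1 0 + 1) else d) PySem.Dict.empty).getD j 0 := by
  obtain ⟨hmem, hnd, hpnd, hknd, hcont⟩ := h
  set bq : String → Bool := fun z =>
    PySem.Set.contains (PySem.Set.ofList ((c.items.filter (fun r => r.2 ≥ k)).map (·.1))) z with hbq
  rw [res_getD bq p PySem.Dict.empty j]
  have hcnt := PySem.List.foldl_count_if (fun z => decide (c.getD z 0 ≥ k))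
    (u.getD j PySem.Set.empty) 0
  simp only [decide_eq_true_eq] at hcnt
  rw [hcnt]
  simp only [PySem.Dict.getD_empty, zero_add, List.countP_eq_length_filter]
  -- compare the two filtered lists by cardinality
  have hlen : ((p.filter (fun q => bq q.2 && q.1 == j)).map Prod.snd).length =
      ((u.getD j PySem.Set.empty).filter (fun z => decide (c.getD z 0 ≥ k))).length := by
    apply List.Perm.length_eq
    apply (List.perm_ext_iff_of_nodup ?_ ?_).2
    · intro z
      simp only [List.mem_map, List.mem_filter]
      constructor
      · rintro ⟨⟨a, b⟩, ⟨hb, hq⟩, rfl⟩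
        have ha : a = j := by
          have := (Bool.and_eq_true _ _).mp hq
          exact of_decide_eq_true (by simpa using this.2)
        have hz : b ∈ u.getD j PySem.Set.empty := (hmem j b).mpr (ha ▸ hb)
        have hbq' : bq b = true := ((Bool.and_eq_true _ _).mp hq).1
        have := (mem_banned c k hknd b).mp hbq'
        exact ⟨hz, decide_eq_true this.2⟩
      · rintro ⟨hz, hk⟩
        have hb : (j, z) ∈ p := (hmem j z).mp hz
        have hcz : c.contains z = true := hcont j z hb
        refine ⟨(j, z), ⟨hb, ?_⟩, rfl⟩
        have : bq z = true := (mem_banned c k hknd z).mpr ⟨hcz, of_decide_eq_true hk⟩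
        simp [this]
    · apply List.Nodup.map_on
      · intro x hx y hy hxy
        have hx1 : x.1 = j := of_decide_eq_true (by
          simpa using ((Bool.and_eq_true _ _).mp (List.mem_filter.mp hx).2).2)
        have hy1 : y.1 = j := of_decide_eq_true (by
          simpa using ((Bool.and_eq_true _ _).mp (List.mem_filter.mp hy).2).2)
        exact Prod.ext (hx1.trans hy1.symm) hxy
      · exact hpnd.filter _
    · exact (hnd j).filter _
  rw [List.length_map] at hlen
  exact_mod_cast hlen.symm

-- ===== VERDICT (by name: the statement is the Claim_ definition above) =====
theorem solution_spec : Claim_equal_solution := by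
  intro id_list report k _ _
  show solution id_list report k = solution_alt id_list report k
  obtain ⟨hinv, hceq⟩ :=
    fold_inv (PySem.Set.ofList report) PySem.Dict.empty PySem.Set.empty PySem.Dict.empty inv_init
  simp only [solution, solution_alt]
  rw [PySem.List.foldl_append_singleton_eq_map]
  simp only [List.nil_append]
  refine List.map_congr_left ?_
  intro j _
  rw [hceq] at hinv ⊢
  exact per_user _ _ _ k hinv j
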